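-- pv_equiv track=rewrite | github.com/ArchipelagoMW/Archipelago | worlds/ff4fe/FreeEnterpriseForAP/FreeEnt/assets/fashion/fashion.py | get_template_coordinate
-- ===== SOURCE A (Python) =====
-- COMBINATIONS = {
--     'stand' : [[0x00,0x01], [0x02,0x03], [0x04,0x05]],
--     'walk' : [[0x00,0x01], [0x02,0x03], [0x0C,0x0D]],
--     'ready' : [[0x06,0x07], [0x08,0x09], [0x0A,0x0B]],
--     'rh swing up' : [[0x00,0x01], [0x14,0x03], [0x15,0x0D]],
--     'lh swing up' : [[0x00,0x1A], [0x02,0x1B], [0x1C,0x1D]],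
--     'lh swing down' : [[0x00,0x01], [0x16,0x17], [0x18,0x19]],
--     'casting 1' : [[0x39,0x3A], [0x3B,0x3C], [0x3D,0x3E]],
--     'casting 2' : [[0x39,0x3A], [0x3F,0x3C], [0x3D,0x3E]],
--     'special' : [[0x30,0x31,0x32], [0x33,0x34,0x35], [0x36,0x37,0x38]],
--     'cheer' : [[0x24,0x25], [0x26,0x27], [0x28,0x29]],
--     'hit' : [[0x1E,0x1F], [0x20,0x21], [0x22,0x23]],
--     'weak' : [[0x0E,0x0F], [0x10,0x11], [0x12,0x13]],
--     'dead' : [[0x2A,0x2B,0x2C], [0x2D,0x2E,0x2F]],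
--     }
--
-- TEMPLATE = {
--     'filename' : 'battle_sprite_template.png',
--     'combinations': {
--         'stand' : (8, 18),
--         'walk' : (28, 18),
--         'ready' : (48, 18),
--         'rh swing up' : (68, 18),
--         'lh swing up' : (88, 18),
--         'lh swing down' : (108, 18),
--         'casting 1' : (128, 18),
--         'casting 2' : (148, 18),
--
--         'special' : (20, 46),
--         'cheer' : (48, 46),
--         'hit' : (68, 46),
--         'weak' : (88, 46),
--         'dead' : (108, 54),
--         },
--     'palette' : (8, 76),
--     'palette_stride' : 4,
--     }
--
-- def get_template_coordinate(tileset_index, pos):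
--     for combination in COMBINATIONS:
--         for row_index,row in enumerate(COMBINATIONS[combination]):
--             if tileset_index in row:
--                 col_index = row.index(tileset_index)
--
--                 template_pos = TEMPLATE['combinations'][combination]
--                 return (
--                     template_pos[0] + col_index * 8 + pos[0],
--                     template_pos[1] + row_index * 8 + pos[1]
--                     )
--     return None
-- ===== SOURCE B (Python) =====
-- # Flat precomputed table: tileset index -> base pixel coordinate in the template image
-- # (the first occurrence of each index in the animation-combination layout, i.e.
-- # TEMPLATE position of its combination plus 8px per column/row).  One dict lookup
-- # replaces the nested scan over COMBINATIONS.
-- _BASE_COORD = {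
--     0x00: (8, 18),
--     0x01: (16, 18),
--     0x02: (8, 26),
--     0x03: (16, 26),
--     0x04: (8, 34),
--     0x05: (16, 34),
--     0x06: (48, 18),
--     0x07: (56, 18),
--     0x08: (48, 26),
--     0x09: (56, 26),
--     0x0A: (48, 34),
--     0x0B: (56, 34),
--     0x0C: (28, 34),
--     0x0D: (36, 34),
--     0x0E: (88, 46),
--     0x0F: (96, 46),
--     0x10: (88, 54),
--     0x11: (96, 54),
--     0x12: (88, 62),
--     0x13: (96, 62),
--     0x14: (68, 26),
--     0x15: (68, 34),
--     0x16: (108, 26),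
--     0x17: (116, 26),
--     0x18: (108, 34),
--     0x19: (116, 34),
--     0x1A: (96, 18),
--     0x1B: (96, 26),
--     0x1C: (88, 34),
--     0x1D: (96, 34),
--     0x1E: (68, 46),
--     0x1F: (76, 46),
--     0x20: (68, 54),
--     0x21: (76, 54),
--     0x22: (68, 62),
--     0x23: (76, 62),
--     0x24: (48, 46),
--     0x25: (56, 46),
--     0x26: (48, 54),
--     0x27: (56, 54),
--     0x28: (48, 62),
--     0x29: (56, 62),
--     0x2A: (108, 54),
--     0x2B: (116, 54),
--     0x2C: (124, 54),
--     0x2D: (108, 62),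
--     0x2E: (116, 62),
--     0x2F: (124, 62),
--     0x30: (20, 46),
--     0x31: (28, 46),
--     0x32: (36, 46),
--     0x33: (20, 54),
--     0x34: (28, 54),
--     0x35: (36, 54),
--     0x36: (20, 62),
--     0x37: (28, 62),
--     0x38: (36, 62),
--     0x39: (128, 18),
--     0x3A: (136, 18),
--     0x3B: (128, 26),
--     0x3C: (136, 26),
--     0x3D: (128, 34),
--     0x3E: (136, 34),
--     0x3F: (148, 26),
-- }
--
-- def get_template_coordinate(tileset_index, pos):
--     base = _BASE_COORD.get(tileset_index)
--     if base is None: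
--         return None
--     return (base[0] + pos[0], base[1] + pos[1])
-- ===== Notes on version B (the rewrite author's own statement) =====
-- stated objective: faster
-- what changed: Replaced the per-call nested scan over COMBINATIONS rows (membership test plus .index plus TEMPLATE lookup) by a single flat precomputed table mapping each tileset index to its base pixel coordinate (first occurrence wins, matching A's scan order), so a call is one dict lookup and an offset addition.
import Mathlib
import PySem

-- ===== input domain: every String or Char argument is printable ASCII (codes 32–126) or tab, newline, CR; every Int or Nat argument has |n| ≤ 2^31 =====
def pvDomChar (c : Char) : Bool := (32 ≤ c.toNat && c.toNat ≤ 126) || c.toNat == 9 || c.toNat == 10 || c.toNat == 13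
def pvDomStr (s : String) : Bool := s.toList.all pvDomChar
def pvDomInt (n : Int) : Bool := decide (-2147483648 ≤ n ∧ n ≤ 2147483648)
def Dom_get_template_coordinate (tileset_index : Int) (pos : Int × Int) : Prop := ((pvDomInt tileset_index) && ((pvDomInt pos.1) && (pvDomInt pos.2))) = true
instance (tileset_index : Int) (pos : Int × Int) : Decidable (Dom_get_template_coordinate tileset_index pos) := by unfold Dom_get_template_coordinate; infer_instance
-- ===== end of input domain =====

-- B replaces A's per-call nested scan over COMBINATIONS by one flat precomputed table
-- (tileset index -> base pixel coordinate) and a single dict lookup (constant-factor faster per call).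

-- ===== PORT A =====
-- COMBINATIONS (dict iterated in insertion order -> association list)
def pvCombos : List (String × List (List Int)) :=
  [ ("stand", [[0x00,0x01], [0x02,0x03], [0x04,0x05]]),
    ("walk", [[0x00,0x01], [0x02,0x03], [0x0C,0x0D]]),
    ("ready", [[0x06,0x07], [0x08,0x09], [0x0A,0x0B]]),
    ("rh swing up", [[0x00,0x01], [0x14,0x03], [0x15,0x0D]]),
    ("lh swing up", [[0x00,0x1A], [0x02,0x1B], [0x1C,0x1D]]),
    ("lh swing down", [[0x00,0x01], [0x16,0x17], [0x18,0x19]]),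
    ("casting 1", [[0x39,0x3A], [0x3B,0x3C], [0x3D,0x3E]]),
    ("casting 2", [[0x39,0x3A], [0x3F,0x3C], [0x3D,0x3E]]),
    ("special", [[0x30,0x31,0x32], [0x33,0x34,0x35], [0x36,0x37,0x38]]),
    ("cheer", [[0x24,0x25], [0x26,0x27], [0x28,0x29]]),
    ("hit", [[0x1E,0x1F], [0x20,0x21], [0x22,0x23]]),
    ("weak", [[0x0E,0x0F], [0x10,0x11], [0x12,0x13]]),
    ("dead", [[0x2A,0x2B,0x2C], [0x2D,0x2E,0x2F]]) ]

-- TEMPLATE['combinations'] (only the part A reads)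
def pvTemplateCombos : PySem.Dict String (Int × Int) :=
  PySem.Dict.ofList
    [ ("stand", (8, 18)), ("walk", (28, 18)), ("ready", (48, 18)),
      ("rh swing up", (68, 18)), ("lh swing up", (88, 18)), ("lh swing down", (108, 18)),
      ("casting 1", (128, 18)), ("casting 2", (148, 18)),
      ("special", (20, 46)), ("cheer", (48, 46)), ("hit", (68, 46)),
      ("weak", (88, 46)), ("dead", (108, 54)) ]

-- inner loop: for row_index,row in enumerate(COMBINATIONS[combination]): ...
-- (KeyError on TEMPLATE['combinations'][combination] is unreachable: every pvCombos key is a pvTemplateCombos key)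
def pvScanRows (ti : Int) (pos : Int × Int) (name : String) :
    List (List Int) → Int → Option (Int × Int)
  | [], _ => none
  | row :: rest, ri =>
    if row.contains ti then
      match PySem.List.index? row ti, pvTemplateCombos.get? name with
      | some ci, some tp => some (tp.1 + (ci : Int) * 8 + pos.1, tp.2 + ri * 8 + pos.2)
      | _, _ => none
    else pvScanRows ti pos name rest (ri + 1)

-- outer loop: for combination in COMBINATIONS: ...
def pvScanCombos (ti : Int) (pos : Int × Int) : List (String × List (List Int)) → Option (Int × Int)
  | [] => none
  | (name, rows) :: rest =>
    match pvScanRows ti pos name rows 0 with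
    | some v => some v
    | none => pvScanCombos ti pos rest

def get_template_coordinate (tileset_index : Int) (pos : Int × Int) : Option (Int × Int) :=
  pvScanCombos tileset_index pos pvCombos

-- ===== PORT B =====
-- _BASE_COORD: the flat literal table of Source B (tileset index -> base pixel coordinate)
def pvBaseCoord : PySem.Dict Int (Int × Int) :=
  PySem.Dict.ofList
    [ (0, (8, 18)),
      (1, (16, 18)),
      (2, (8, 26)),
      (3, (16, 26)),
      (4, (8, 34)),
      (5, (16, 34)),
      (6, (48, 18)),
      (7, (56, 18)),
      (8, (48, 26)),
      (9, (56, 26)),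
      (10, (48, 34)),
      (11, (56, 34)),
      (12, (28, 34)),
      (13, (36, 34)),
      (14, (88, 46)),
      (15, (96, 46)),
      (16, (88, 54)),
      (17, (96, 54)),
      (18, (88, 62)),
      (19, (96, 62)),
      (20, (68, 26)),
      (21, (68, 34)),
      (22, (108, 26)),
      (23, (116, 26)),
      (24, (108, 34)),
      (25, (116, 34)),
      (26, (96, 18)),
      (27, (96, 26)),
      (28, (88, 34)),
      (29, (96, 34)),
      (30, (68, 46)),
      (31, (76, 46)),
      (32, (68, 54)),
      (33, (76, 54)),
      (34, (68, 62)),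
      (35, (76, 62)),
      (36, (48, 46)),
      (37, (56, 46)),
      (38, (48, 54)),
      (39, (56, 54)),
      (40, (48, 62)),
      (41, (56, 62)),
      (42, (108, 54)),
      (43, (116, 54)),
      (44, (124, 54)),
      (45, (108, 62)),
      (46, (116, 62)),
      (47, (124, 62)),
      (48, (20, 46)),
      (49, (28, 46)),
      (50, (36, 46)),
      (51, (20, 54)),
      (52, (28, 54)),
      (53, (36, 54)),
      (54, (20, 62)),
      (55, (28, 62)),
      (56, (36, 62)),
      (57, (128, 18)),
      (58, (136, 18)),
      (59, (128, 26)),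
      (60, (136, 26)),
      (61, (128, 34)),
      (62, (136, 34)),
      (63, (148, 26)) ]

def get_template_coordinate_alt (tileset_index : Int) (pos : Int × Int) : Option (Int × Int) :=
  match pvBaseCoord.get? tileset_index with
  | none => none
  | some base => some (base.1 + pos.1, base.2 + pos.2)

-- ===== PRECONDITION & SPEC =====
def Spec_get_template_coordinate (tileset_index : Int) (pos : Int × Int) (out : Option (Int × Int)) : Prop := out = get_template_coordinate_alt tileset_index pos
instance (tileset_index : Int) (pos : Int × Int) (out : Option (Int × Int)) : Decidable (Spec_get_template_coordinate tileset_index pos out) := by unfold Spec_get_template_coordinate; infer_instance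

-- ===== CLAIM =====
def Claim_equal_get_template_coordinate : Prop := ∀ (tileset_index : Int) (pos : Int × Int), Dom_get_template_coordinate tileset_index pos → Spec_get_template_coordinate tileset_index pos (get_template_coordinate tileset_index pos)

-- ===== LEMMAS AND PROOFS =====
-- all tileset indices occurring in pvCombos (proof-only enumeration)
def pvKeys : List Int := (List.range 64).map (fun n => (n : Int))

lemma scanRows_none (ti : Int) (pos : Int × Int) (name : String) (rows : List (List Int)) (ri : Int)
    (h : ∀ row ∈ rows, ti ∉ row) : pvScanRows ti pos name rows ri = none := by
  induction rows generalizing ri with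
  | nil => simp [pvScanRows]
  | cons row rest ih =>
    have hm : ti ∉ row := h row (List.mem_cons_self)
    simp only [pvScanRows, List.contains_eq_mem, hm, decide_false, Bool.false_eq_true,
      if_false]
    exact ih (ri + 1) (fun r hr => h r (List.mem_cons_of_mem _ hr))

lemma scanCombos_none (ti : Int) (pos : Int × Int) (cs : List (String × List (List Int)))
    (h : ∀ p ∈ cs, ∀ row ∈ p.2, ti ∉ row) : pvScanCombos ti pos cs = none := by
  induction cs with
  | nil => simp [pvScanCombos]
  | cons c rest ih =>
    simp only [pvScanCombos,
      scanRows_none ti pos c.1 c.2 0 (fun r hr => h c (List.mem_cons_self) r hr)]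
    exact ih (fun p hp => h p (List.mem_cons_of_mem _ hp))

-- every tileset index occurring in pvCombos is in pvKeys
lemma combos_keys : ∀ p ∈ pvCombos, ∀ row ∈ p.2, ∀ x ∈ row, x ∈ pvKeys := by decide

lemma scanRows_shift (ti : Int) (pos : Int × Int) (name : String) (rows : List (List Int)) (ri : Int) :
    pvScanRows ti pos name rows ri =
      (pvScanRows ti (0, 0) name rows ri).map (fun b => (b.1 + pos.1, b.2 + pos.2)) := by
  induction rows generalizing ri with
  | nil => simp [pvScanRows]
  | cons row rest ih =>
    simp only [pvScanRows]
    split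
    · cases PySem.List.index? row ti <;> cases pvTemplateCombos.get? name <;> simp
    · exact ih (ri + 1)

lemma scanCombos_shift (ti : Int) (pos : Int × Int) (cs : List (String × List (List Int))) :
    pvScanCombos ti pos cs =
      (pvScanCombos ti (0, 0) cs).map (fun b => (b.1 + pos.1, b.2 + pos.2)) := by
  induction cs with
  | nil => simp [pvScanCombos]
  | cons c rest ih =>
    simp only [pvScanCombos]
    rw [scanRows_shift]
    cases pvScanRows ti (0, 0) c.1 c.2 0 <;> simp [ih]

set_option maxRecDepth 40000 in
lemma base_eq (ti : Int) :
    pvScanCombos ti (0, 0) pvCombos = pvBaseCoord.get? ti := by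
  by_cases h : ti ∈ pvKeys
  · fin_cases h <;> decide
  · rw [scanCombos_none ti (0, 0) pvCombos
      (fun p hp row hr hmem => h (combos_keys p hp row hr ti hmem))]
    have hkeys : pvBaseCoord.keys = pvKeys := by decide
    have hc : ¬ pvBaseCoord.contains ti = true := by
      rw [PySem.Dict.contains_iff_mem_keys, hkeys]; exact h
    symm
    rw [PySem.Dict.get?_eq_none_iff_contains]
    simpa using hc

-- ===== VERDICT =====
theorem get_template_coordinate_spec : Claim_equal_get_template_coordinate := by
  intro ti pos _
  unfold Spec_get_template_coordinate get_template_coordinate get_template_coordinate_alt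
  rw [scanCombos_shift, base_eq]
  cases pvBaseCoord.get? ti <;> simp
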